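-- pv_equiv track=rewrite | github.com/gcorley/leetProblems | 2432_LongestTask/longestTask.py | longest_task
-- ===== SOURCE A (Python) =====
-- def longest_task(n: int, logs: list[list[int]]) -> int:
--     answer = [0, 0]  # id, duration
--     prev = 0
--     for log in logs:
--         dur = log[1] - prev
--         if dur > answer[1] or dur == answer[1] and log[0] < answer[0]:
--             answer[0] = log[0]
--             answer[1] = log[1] - prev
--         prev = log[1]
--     return answer[0]
-- ===== SOURCE B (Python) =====
-- def longest_task(n: int, logs: list[list[int]]) -> int:
--     # Group by duration: dict duration -> smallest task id with that duration,
--     # seeded with {0: 0} (the problem's baseline); answer = id stored at the max key.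
--     best = {0: 0}
--     prev = 0
--     for log in logs:
--         dur = log[1] - prev
--         if dur not in best or log[0] < best[dur]:
--             best[dur] = log[0]
--         prev = log[1]
--     return best[max(best)]
-- ===== Notes on version B (the rewrite author's own statement) =====
-- stated objective: alternative
-- what changed: B replaces A's incrementally maintained best-(id,duration) champion with a grouping dictionary duration->smallest id (seeded {0:0}); the answer is selected afterwards as the value stored at the dict's maximum key, so no running argmax/tie-break comparison is carried through the scan.
import Mathlib
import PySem

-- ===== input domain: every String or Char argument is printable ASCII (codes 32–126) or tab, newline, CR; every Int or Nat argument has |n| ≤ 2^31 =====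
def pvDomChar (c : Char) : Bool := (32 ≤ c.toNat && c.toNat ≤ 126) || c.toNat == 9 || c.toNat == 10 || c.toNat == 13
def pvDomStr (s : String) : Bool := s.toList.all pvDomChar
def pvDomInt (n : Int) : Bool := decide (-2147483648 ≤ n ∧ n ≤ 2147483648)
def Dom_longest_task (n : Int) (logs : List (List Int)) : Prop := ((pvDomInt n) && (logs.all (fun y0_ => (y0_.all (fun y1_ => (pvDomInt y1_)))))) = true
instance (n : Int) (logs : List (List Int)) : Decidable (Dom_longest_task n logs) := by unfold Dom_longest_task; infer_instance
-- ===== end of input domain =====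

-- B groups durations in a dictionary duration -> smallest id (seeded {0:0}) and afterwards reads off the value at the maximum key, instead of A's running best-(id,duration) champion; same O(n) cost.

-- ===== PORT A =====
-- loop state: (answer[0], answer[1], prev); log[i] ported via pyGet? (Pre_ guarantees length ≥ 2, so getD 0 is never the raising case)
def stepA (st : Int × Int × Int) (log : List Int) : Int × Int × Int :=
  let dur := (PySem.List.pyGet? log 1).getD 0 - st.2.2
  if dur > st.2.1 ∨ (dur = st.2.1 ∧ (PySem.List.pyGet? log 0).getD 0 < st.1) then
    ((PySem.List.pyGet? log 0).getD 0, (PySem.List.pyGet? log 1).getD 0 - st.2.2, (PySem.List.pyGet? log 1).getD 0)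
  else
    (st.1, st.2.1, (PySem.List.pyGet? log 1).getD 0)

def longest_task (n : Int) (logs : List (List Int)) : Int :=
  (logs.foldl stepA (0, 0, 0)).1

-- ===== PORT B =====
-- loop state: (best dict, prev); 'dur not in best or log[0] < best[dur]' — best[dur] is only read
-- when the key is present, so getD 0 is exact
def stepB (st : PySem.Dict Int Int × Int) (log : List Int) : PySem.Dict Int Int × Int :=
  let dur := (PySem.List.pyGet? log 1).getD 0 - st.2
  (if st.1.contains dur = false ∨ (PySem.List.pyGet? log 0).getD 0 < st.1.getD dur 0 then
     st.1.insert dur ((PySem.List.pyGet? log 0).getD 0)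
   else st.1,
   (PySem.List.pyGet? log 1).getD 0)

def longest_task_alt (n : Int) (logs : List (List Int)) : Int :=
  let best := (logs.foldl stepB ((PySem.Dict.empty : PySem.Dict Int Int).insert 0 0, 0)).1
  -- best[max(best)]: the dict is never empty and max(best) is one of its keys, so neither
  -- fallback (none branch / getD default) is ever the raising Python case
  match PySem.List.max? best.keys (fun k => k) with
  | some m => (best.get? m).getD 0
  | none => 0

-- ===== PRECONDITION & SPEC =====
-- Pre_ excludes exactly the inputs where A raises IndexError: some inner log shorter than 2 elements.
def Pre_longest_task (n : Int) (logs : List (List Int)) : Prop := ∀ log ∈ logs, 2 ≤ log.length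
instance (n : Int) (logs : List (List Int)) : Decidable (Pre_longest_task n logs) := by unfold Pre_longest_task; infer_instance
def pvWitness_longest_task : Int × List (List Int) := (2, [[1, 3], [2, 5]])

def Spec_longest_task (n : Int) (logs : List (List Int)) (out : Int) : Prop := out = longest_task_alt n logs
instance (n : Int) (logs : List (List Int)) (out : Int) : Decidable (Spec_longest_task n logs out) := by unfold Spec_longest_task; infer_instance

-- ===== CLAIM (what is proved, stated in full; the proofs are below) =====
def Claim_equal_longest_task : Prop := ∀ (n : Int) (logs : List (List Int)), Dom_longest_task n logs → Pre_longest_task n logs → Spec_longest_task n logs (longest_task n logs)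

-- ===== LEMMAS AND PROOFS =====

-- abbreviations for the proof only
def pvEnd (log : List Int) : Int := (PySem.List.pyGet? log 1).getD 0
def pvId (log : List Int) : Int := (PySem.List.pyGet? log 0).getD 0

-- the (duration, -id) pairs with prev threaded sequentially
def pvPairs (prev : Int) : List (List Int) → List (Int × Int)
  | [] => []
  | log :: t => (pvEnd log - prev, -(pvId log)) :: pvPairs (pvEnd log) t

-- lexicographic champion step shared by both sides' characterisations
def pvStep (m p : Int × Int) : Int × Int :=
  if m.1 < p.1 ∨ (p.1 = m.1 ∧ m.2 < p.2) then p else m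

-- A's fold computes the id component of the lexicographic maximum
lemma foldA_eq (logs : List (List Int)) (m : Int × Int) (prev : Int) :
    (logs.foldl stepA (-m.2, m.1, prev)).1 = -((pvPairs prev logs).foldl pvStep m).2 := by
  induction logs generalizing m prev with
  | nil => rfl
  | cons x t ih =>
      have hstep : stepA (-m.2, m.1, prev) x
          = (-(pvStep m (pvEnd x - prev, -(pvId x))).2,
             (pvStep m (pvEnd x - prev, -(pvId x))).1, pvEnd x) := by
        simp only [stepA, pvStep, pvEnd, pvId]
        split_ifs with h1 h2 h2
        · simp
        · exfalso; rcases h1 with h | ⟨he, hi⟩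
          · exact h2 (Or.inl h)
          · exact h2 (Or.inr ⟨by omega, by omega⟩)
        · exfalso; rcases h2 with h | ⟨hle, hlt⟩
          · exact h1 (Or.inl h)
          · exact h1 (Or.inr ⟨by omega, by omega⟩)
        · simp
      simp only [List.foldl_cons, hstep, pvPairs]
      exact ih (pvStep m (pvEnd x - prev, -(pvId x))) (pvEnd x)

-- B's dict fold keeps: keys nodup, all keys ≤ champion duration, champion key stores -champion.2
lemma stepB_inv (d : PySem.Dict Int Int) (m : Int × Int) (prev : Int) (log : List Int)
    (hnd : d.keys.Nodup) (hub : ∀ k ∈ d.keys, k ≤ m.1) (hget : d.get? m.1 = some (-m.2)) :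
    ((stepB (d, prev) log).1.keys.Nodup ∧
      (∀ k ∈ (stepB (d, prev) log).1.keys, k ≤ (pvStep m (pvEnd log - prev, -(pvId log))).1) ∧
      (stepB (d, prev) log).1.get? (pvStep m (pvEnd log - prev, -(pvId log))).1
        = some (-(pvStep m (pvEnd log - prev, -(pvId log))).2)) ∧
    (stepB (d, prev) log).2 = pvEnd log := by
  have hmem : m.1 ∈ d.keys := by
    by_contra h
    rw [← PySem.Dict.get?_eq_none_iff_not_mem_keys] at h
    rw [h] at hget
    exact absurd hget (by simp)
  have hgetD : d.getD (m.1) 0 = -m.2 := by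
    rw [PySem.Dict.getD_eq_get?_getD, hget]; rfl
  refine ⟨?_, rfl⟩
  set dur := pvEnd log - prev with hdur
  set id := pvId log with hid
  have hstep1 : (stepB (d, prev) log).1
      = if d.contains dur = false ∨ id < d.getD dur 0 then d.insert dur id else d := rfl
  by_cases hwin : m.1 < dur ∨ (dur = m.1 ∧ m.2 < -id)
  · -- champion becomes (dur, -id); the dict gets best[dur] = id
    have hp : pvStep m (dur, -id) = (dur, -id) := by
      unfold pvStep; dsimp only; rw [if_pos hwin]
    have hins : (stepB (d, prev) log).1 = d.insert dur id := by
      rw [hstep1]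
      rcases hwin with h | ⟨he, hi⟩
      · have hc : d.contains dur = false := by
          rcases hx : d.contains dur with _ | _
          · rfl
          · exact absurd (hub _ ((PySem.Dict.contains_iff_mem_keys d dur).1 hx)) (by omega)
        rw [if_pos (Or.inl hc)]
      · rw [if_pos (Or.inr (by rw [he, hgetD]; omega))]
    rw [hp, hins]
    refine ⟨PySem.Dict.nodup_keys_insert _ _ _ hnd, ?_, ?_⟩
    · intro k hk
      rcases (PySem.Dict.mem_keys_insert d dur k id).1 hk with h | h
      · dsimp only; rcases hwin with h' | ⟨he, _⟩ <;> omega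
      · have := hub _ h
        dsimp only; rcases hwin with h' | ⟨he, _⟩ <;> omega
    · dsimp only
      simp [PySem.Dict.get?_insert_self]
  · -- champion stays m
    have hp : pvStep m (dur, -id) = m := by
      unfold pvStep; dsimp only; rw [if_neg hwin]
    have hle : dur ≤ m.1 := by
      by_contra hx; exact hwin (Or.inl (by omega))
    have hties : dur = m.1 → -id ≤ m.2 := fun he => by
      by_contra hx; exact hwin (Or.inr ⟨he, by omega⟩)
    rw [hp, hstep1]
    split_ifs with hcond
    · -- a strictly smaller key is set/updated; m.1's entry is untouched
      have hne : m.1 ≠ dur := by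
        intro he
        rcases hcond with hc | hlt
        · have hc' : d.contains dur = true :=
            (PySem.Dict.contains_iff_mem_keys d dur).2 (he ▸ hmem)
          rw [hc'] at hc
          exact absurd hc (by simp)
        · have h1 := hties he.symm
          rw [← he, hgetD] at hlt
          omega
      refine ⟨PySem.Dict.nodup_keys_insert _ _ _ hnd, ?_, ?_⟩
      · intro k hk
        rcases (PySem.Dict.mem_keys_insert d dur k id).1 hk with h | h
        · omega
        · exact hub _ h
      · rw [PySem.Dict.get?_insert_of_ne d id hne]; exact hget
    · exact ⟨hnd, hub, hget⟩

lemma foldB_inv (logs : List (List Int)) (d : PySem.Dict Int Int) (m : Int × Int) (prev : Int)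
    (hnd : d.keys.Nodup) (hub : ∀ k ∈ d.keys, k ≤ m.1) (hget : d.get? m.1 = some (-m.2)) :
    (logs.foldl stepB (d, prev)).1.keys.Nodup ∧
    (∀ k ∈ (logs.foldl stepB (d, prev)).1.keys, k ≤ ((pvPairs prev logs).foldl pvStep m).1) ∧
    (logs.foldl stepB (d, prev)).1.get? ((pvPairs prev logs).foldl pvStep m).1
      = some (-((pvPairs prev logs).foldl pvStep m).2) := by
  induction logs generalizing d m prev with
  | nil => exact ⟨hnd, hub, hget⟩
  | cons x t ih =>
      have hinv := stepB_inv d m prev x hnd hub hget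
      rcases hsb : stepB (d, prev) x with ⟨d2, p2⟩
      rw [hsb] at hinv
      obtain ⟨⟨h1, h2, h3⟩, h4⟩ := hinv
      dsimp only at h1 h2 h3 h4
      subst h4
      simp only [List.foldl_cons, pvPairs, hsb]
      exact ih d2 _ _ h1 h2 h3

-- ===== VERDICT (by name: the statement is the Claim_ definition above) =====
theorem longest_task_spec : Claim_equal_longest_task := by
  intro n logs _ _
  show longest_task n logs = longest_task_alt n logs
  have hs1 : ((PySem.Dict.empty : PySem.Dict Int Int).insert 0 0).keys = [0] := rfl
  obtain ⟨hnd, hub, hget⟩ := foldB_inv logs ((PySem.Dict.empty : PySem.Dict Int Int).insert 0 0)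
      (0, 0) 0 (by rw [hs1]; simp) (by rw [hs1]; intro k hk; simp at hk; omega) (by rfl)
  have hA : (logs.foldl stepA (0, 0, 0)).1 = -((pvPairs 0 logs).foldl pvStep (0, 0)).2 := by
    have := foldA_eq logs (0, 0) 0
    simpa using this
  have hmem : ((pvPairs 0 logs).foldl pvStep (0, 0)).1
      ∈ (logs.foldl stepB ((PySem.Dict.empty : PySem.Dict Int Int).insert 0 0, 0)).1.keys := by
    by_contra h
    rw [← PySem.Dict.get?_eq_none_iff_not_mem_keys] at h
    rw [h] at hget
    exact absurd hget (by simp)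
  have hmax : PySem.List.max?
      (logs.foldl stepB ((PySem.Dict.empty : PySem.Dict Int Int).insert 0 0, 0)).1.keys
      (fun k => k) = some ((pvPairs 0 logs).foldl pvStep (0, 0)).1 := by
    cases hx : PySem.List.max?
        (logs.foldl stepB ((PySem.Dict.empty : PySem.Dict Int Int).insert 0 0, 0)).1.keys
        (fun k => k) with
    | none =>
        rw [PySem.List.max?_eq_none_iff] at hx
        rw [hx] at hmem
        exact absurd hmem (List.not_mem_nil)
    | some z =>
        have hz := PySem.List.max?_mem hx
        have hle := PySem.List.max?_isMax hx _ hmem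
        have hge := hub z hz
        simp only at hle
        congr 1
        omega
  unfold longest_task longest_task_alt
  rw [hA]
  simp only [hmax, hget, Option.getD_some]
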